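-- pv_equiv track=rewrite | github.com/Leapense/problems | 22683번: Square Route/solution.py | contiguous_sum_counts
-- ===== SOURCE A (Python) =====
-- from collections import defaultdict
-- from typing import Dict, List
--
-- def contiguous_sum_counts(a: List[int]) -> Dict[int, int]:
--     n = len(a)
--     counts: Dict[int, int] = defaultdict(int)
--     for i in range(n):
--         s = 0
--         for j in range(i, n):
--             s += a[j]
--             counts[s] += 1
--     return counts
-- ===== SOURCE B (Python) =====
-- from collections import defaultdict
-- from typing import Dict, List
--
-- def contiguous_sum_counts(a: List[int]) -> Dict[int, int]:
--     n = len(a)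
--     s = 0
--     prefix = [0]
--     for x in a:
--         s += x
--         prefix.append(s)
--     counts: Dict[int, int] = defaultdict(int)
--     for i in range(n):
--         for j in range(i + 1, n + 1):
--             counts[prefix[j] - prefix[i]] += 1
--     return counts
-- ===== Notes on version B (the rewrite author's own statement) =====
-- stated objective: alternative
-- what changed: B precomputes a prefix-sum table in a separate pass and obtains each subarray sum by subtraction prefix[j]-prefix[i], instead of A's inner running accumulator.
import Mathlib
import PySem

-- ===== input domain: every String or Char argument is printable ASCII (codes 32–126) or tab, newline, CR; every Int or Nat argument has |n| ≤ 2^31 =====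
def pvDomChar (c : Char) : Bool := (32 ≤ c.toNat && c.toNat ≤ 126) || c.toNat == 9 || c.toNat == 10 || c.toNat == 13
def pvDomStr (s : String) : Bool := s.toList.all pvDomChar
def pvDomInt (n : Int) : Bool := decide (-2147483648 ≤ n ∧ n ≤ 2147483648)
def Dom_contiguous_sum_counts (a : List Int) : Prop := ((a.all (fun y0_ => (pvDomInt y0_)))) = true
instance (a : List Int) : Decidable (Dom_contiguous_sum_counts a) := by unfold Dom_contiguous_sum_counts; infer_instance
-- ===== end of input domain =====

-- B replaces A's inner running accumulator by a precomputed prefix-sum table, deriving each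
-- contiguous-subarray sum by subtraction (alternative decomposition, same O(n^2) cost).


-- ===== PORT A =====
def contiguous_sum_counts (a : List Int) : List (Int × Int) :=
  let n : Int := a.length
  let counts := (PySem.List.pyRange 0 n 1).foldl
    (fun counts i =>
      ((PySem.List.pyRange i n 1).foldl
        (fun (p : Int × PySem.Dict Int Int) j =>
          let s := p.1 + PySem.List.pyGetD a j 0   -- j always in range here
          (s, p.2.modify s 0 (· + 1)))
        (0, counts)).2)
    PySem.Dict.empty
  counts.items

-- ===== PORT B =====
def contiguous_sum_counts_alt (a : List Int) : List (Int × Int) :=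
  let n : Int := a.length
  let sp := a.foldl (fun (p : Int × List Int) x => (p.1 + x, p.2 ++ [p.1 + x])) (0, [0])
  let pre := sp.2
  let counts := (PySem.List.pyRange 0 n 1).foldl
    (fun d i =>
      (PySem.List.pyRange (i + 1) (n + 1) 1).foldl
        (fun (d : PySem.Dict Int Int) j =>
          d.modify (PySem.List.pyGetD pre j 0 - PySem.List.pyGetD pre i 0) 0 (· + 1))
        d)
    PySem.Dict.empty
  counts.items

-- ===== PRECONDITION & SPEC =====
def Spec_contiguous_sum_counts (a : List Int) (out : List (Int × Int)) : Prop := out = contiguous_sum_counts_alt a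
instance (a : List Int) (out : List (Int × Int)) : Decidable (Spec_contiguous_sum_counts a out) := by unfold Spec_contiguous_sum_counts; infer_instance

-- ===== CLAIM (what is proved, stated in full; the proofs are below) =====
def Claim_equal_contiguous_sum_counts : Prop := ∀ (a : List Int), Dom_contiguous_sum_counts a → Spec_contiguous_sum_counts a (contiguous_sum_counts a)

-- ===== LEMMAS AND PROOFS =====

/-- Running partial sums of `l` starting after accumulated value `s`. -/
def psums : Int → List Int → List Int
  | _, [] => []
  | s, x :: xs => (s + x) :: psums (s + x) xs

theorem foldl_prefix_build (l : List Int) : ∀ (s : Int) (acc : List Int),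
    l.foldl (fun (p : Int × List Int) x => (p.1 + x, p.2 ++ [p.1 + x])) (s, acc)
      = (s + l.sum, acc ++ psums s l) := by
  induction l with
  | nil => intro s acc; simp [psums]
  | cons x xs ih => intro s acc; simp [psums, ih (s + x) (acc ++ [s + x]), add_assoc]

theorem psums_getD_step (l : List Int) : ∀ (s : Int) (j : Nat), j < l.length →
    (s :: psums s l).getD (j + 1) 0 = (s :: psums s l).getD j 0 + l.getD j 0 := by
  induction l with
  | nil => intro s j h; simp at h
  | cons x xs ih =>
    intro s j h
    cases j with
    | zero => simp [psums]
    | succ j =>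
      have := ih (s + x) j (by simpa using h)
      simpa [psums] using this

theorem foldl_inner_A (l : List Int) : ∀ (s : Int) (d : PySem.Dict Int Int),
    (l.foldl (fun (p : Int × PySem.Dict Int Int) x =>
        (p.1 + x, p.2.modify (p.1 + x) 0 (· + 1))) (s, d)).2
      = (psums s l).foldl (fun d k => d.modify k 0 (· + 1)) d := by
  induction l with
  | nil => intro s d; simp [psums]
  | cons x xs ih => intro s d; simpa [psums] using ih (s + x) (d.modify (s + x) 0 (· + 1))

/-- The key list of A's inner loop at start index `i` equals B's list of prefix differences. -/
theorem keys_eq (a : List Int) : ∀ (k i : Nat), i + k = a.length → ∀ (c : Int),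
    psums ((0 :: psums 0 a).getD i 0 - c) (a.drop i)
      = (PySem.List.pyRange ((i : Int) + 1) ((a.length : Int) + 1) 1).map
          (fun j => PySem.List.pyGetD (0 :: psums 0 a) j 0 - c) := by
  intro k
  induction k with
  | zero =>
    intro i h c
    rw [PySem.List.pyRange_one_eq_nil (by omega : ((a.length : Int) + 1) ≤ (i : Int) + 1)]
    simp [List.drop_eq_nil_of_le (by omega : a.length ≤ i), psums]
  | succ k ih =>
    intro i h c
    have hi : i < a.length := by omega
    have hdrop : a.drop i = a[i] :: a.drop (i + 1) := List.drop_eq_getElem_cons hi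
    have hstep : (0 :: psums 0 a).getD (i + 1) 0 = (0 :: psums 0 a).getD i 0 + a[i] := by
      rw [psums_getD_step a 0 i hi, List.getD_eq_getElem a 0 hi]
    rw [PySem.List.pyRange_one_cons (by omega : (i : Int) + 1 < (a.length : Int) + 1)]
    rw [hdrop]
    show ((0 :: psums 0 a).getD i 0 - c + a[i]) ::
        psums ((0 :: psums 0 a).getD i 0 - c + a[i]) (a.drop (i + 1)) = _
    have hmap : PySem.List.pyGetD (0 :: psums 0 a) ((i : Int) + 1) 0
        = (0 :: psums 0 a).getD (i + 1) 0 := by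
      have : ((i : Int) + 1) = ((i + 1 : Nat) : Int) := by push_cast; ring
      rw [this, PySem.List.pyGetD_natCast]
    have htail := ih (i + 1) (by omega) c
    rw [show (0 :: psums 0 a).getD i 0 - c + a[i] = (0 :: psums 0 a).getD (i + 1) 0 - c by
      rw [hstep]; ring]
    rw [htail]
    simp [hmap]

-- ===== VERDICT (by name: the statement is the Claim_ definition above) =====
theorem contiguous_sum_counts_spec : Claim_equal_contiguous_sum_counts := by
  intro a _
  unfold Spec_contiguous_sum_counts contiguous_sum_counts contiguous_sum_counts_alt
  simp only [foldl_prefix_build a 0 [0], List.singleton_append]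
  congr 1
  apply PySem.List.foldl_congr_mem'
  intro i hi d
  have hmem := (PySem.List.mem_pyRange_one).1 hi
  have hi0 : 0 ≤ i := hmem.1
  have hiln : i < (a.length : Int) := hmem.2
  -- A side: inner fold over indices = fold over dropped values = fold over psums keys
  rw [PySem.List.foldl_pyRange_pyGetD' a 0
    (fun (p : Int × PySem.Dict Int Int) x => (p.1 + x, p.2.modify (p.1 + x) 0 (· + 1))) (0, d) hi0]
  rw [foldl_inner_A (a.drop i.toNat) 0 d]
  -- B side: the range indices map to the same key list
  have hc : PySem.List.pyGetD (0 :: psums 0 a) i 0 = (0 :: psums 0 a).getD i.toNat 0 := by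
    rw [show i = ((i.toNat : Nat) : Int) by omega, PySem.List.pyGetD_natCast]
    congr 1
  have hkeys : psums 0 (a.drop i.toNat)
      = (PySem.List.pyRange (i + 1) ((a.length : Int) + 1) 1).map
          (fun j => PySem.List.pyGetD (0 :: psums 0 a) j 0 - PySem.List.pyGetD (0 :: psums 0 a) i 0) := by
    rw [hc]
    have := keys_eq a (a.length - i.toNat) i.toNat (by omega) ((0 :: psums 0 a).getD i.toNat 0)
    rw [sub_self] at this
    rw [show (i : Int) + 1 = ((i.toNat : Nat) : Int) + 1 by omega]
    exact this
  rw [hkeys, List.foldl_map]
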